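-- pv_equiv track=rewrite | github.com/webdevboy/python-generate-hexadecimal | hex_gen.py | is_consecutive_generation
-- ===== SOURCE A (Python) =====
-- hex_length = 8
--
-- hex_chars = [
--     "0", "1", "2", "3", "4", "5", "6", "7", "8",
--     "9", "A", "B", "C", "D", "E", "F"
-- ]
--
-- def is_consecutive_generation(string: str):
--     """Check if string generated is consecutive."""
--     # Load last index
--     max_length = len(hex_chars)
--
--     # Iterate checking
--     for i in range(len(hex_chars)):
--         # Generate compare list
--         compare_list = (
--             hex_chars[i:i+hex_length] if i + hex_length < max_length
--             else hex_chars[i:] + hex_chars[:(i + hex_length - max_length)]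
--         )
--
--         # Ignore if not match
--         if "".join(compare_list) != string:
--             continue
--
--         return True
--
--     return False
-- ===== SOURCE B (Python) =====
-- hex_length = 8
--
-- hex_chars = [
--     "0", "1", "2", "3", "4", "5", "6", "7", "8",
--     "9", "A", "B", "C", "D", "E", "F"
-- ]
--
-- def is_consecutive_generation(string: str):
--     """Check if string generated is consecutive."""
--     # Every consecutive cyclic window of length 8 is a substring of the
--     # doubled hex alphabet, and every length-8 substring of it is such a window.
--     doubled = "".join(hex_chars + hex_chars)
--     return isinstance(string, str) and len(string) == hex_length and string in doubled
-- ===== Notes on version B (the rewrite author's own statement) =====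
-- stated objective: idiomatic
-- what changed: Replaces the 16-iteration generate-and-compare loop over cyclic slices with a single substring test against the doubled hex alphabet (all length-8 cyclic windows are exactly its length-8 substrings).
import Mathlib
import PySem

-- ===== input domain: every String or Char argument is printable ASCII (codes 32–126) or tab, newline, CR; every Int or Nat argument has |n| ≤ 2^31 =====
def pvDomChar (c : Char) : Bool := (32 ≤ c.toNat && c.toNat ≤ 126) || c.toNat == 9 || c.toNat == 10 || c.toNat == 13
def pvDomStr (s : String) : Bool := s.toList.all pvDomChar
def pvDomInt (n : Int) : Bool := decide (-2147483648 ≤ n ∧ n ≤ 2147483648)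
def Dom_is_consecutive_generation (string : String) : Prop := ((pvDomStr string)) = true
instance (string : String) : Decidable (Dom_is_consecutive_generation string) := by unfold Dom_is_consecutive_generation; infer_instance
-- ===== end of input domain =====

-- B replaces A's 16-iteration generate-and-compare loop over cyclic slices by a single
-- substring test against the doubled hex alphabet (objective: idiomatic; same return value).

-- ===== PORT A =====
def hexChars : List String := ["0","1","2","3","4","5","6","7","8","9","A","B","C","D","E","F"]
def hexLength : Int := 8

-- compare_list for index i (the slice expression of A, branch order kept)
def compareList (i : Int) : List String :=
  let maxLength : Int := hexChars.length
  if i + hexLength < maxLength then PySem.List.slice hexChars (some i) (some (i + hexLength))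
  else PySem.List.slice hexChars (some i) none ++ PySem.List.slice hexChars none (some (i + hexLength - maxLength))

-- A's for-loop with early return
def aLoop (string : String) : List Int → Bool
  | [] => false
  | i :: rest =>
      if PySem.Str.join "" (compareList i) ≠ string then aLoop string rest
      else true

def is_consecutive_generation (string : String) : Bool :=
  aLoop string (PySem.List.pyRange 0 (hexChars.length) 1)

-- ===== PORT B =====
def is_consecutive_generation_alt (string : String) : Bool :=
  let doubled : String := PySem.Str.join "" (hexChars ++ hexChars)
  -- isinstance(string, str) is True for every String argument
  PySem.Str.len string == 8 && PySem.Str.isIn string doubled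

-- ===== PRECONDITION & SPEC =====
def Spec_is_consecutive_generation (string : String) (out : Bool) : Prop := out = is_consecutive_generation_alt string
instance (string : String) (out : Bool) : Decidable (Spec_is_consecutive_generation string out) := by unfold Spec_is_consecutive_generation; infer_instance

-- ===== CLAIM (what is proved, stated in full; the proofs are below) =====
def Claim_equal_is_consecutive_generation : Prop := ∀ (string : String), Dom_is_consecutive_generation string → Spec_is_consecutive_generation string (is_consecutive_generation string)

-- ===== LEMMAS AND PROOFS =====

-- the 16 cyclic windows both programs recognise
def windows : List String :=
  ["01234567","12345678","23456789","3456789A","456789AB","56789ABC","6789ABCD","789ABCDE",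
   "89ABCDEF","9ABCDEF0","ABCDEF01","BCDEF012","CDEF0123","DEF01234","EF012345","F0123456"]

lemma ifStep (w s : String) (b : Bool) : (if w ≠ s then b else true) = (s == w || b) := by
  rcases eq_or_ne w s with rfl | h
  · simp
  · have hb : (s == w) = false := beq_eq_false_iff_ne.mpr (Ne.symm h)
    simp [if_pos h, hb]

set_option maxHeartbeats 2000000 in
lemma A_iff (s : String) : is_consecutive_generation s = true ↔ s ∈ windows := by
  have hrange : PySem.List.pyRange 0 (hexChars.length : Int) 1
      = [0,1,2,3,4,5,6,7,8,9,10,11,12,13,14,15] := by decide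
  rw [is_consecutive_generation, hrange]
  simp only [aLoop,
    show PySem.Str.join "" (compareList 0) = "01234567" from by decide,
    show PySem.Str.join "" (compareList 1) = "12345678" from by decide,
    show PySem.Str.join "" (compareList 2) = "23456789" from by decide,
    show PySem.Str.join "" (compareList 3) = "3456789A" from by decide,
    show PySem.Str.join "" (compareList 4) = "456789AB" from by decide,
    show PySem.Str.join "" (compareList 5) = "56789ABC" from by decide,
    show PySem.Str.join "" (compareList 6) = "6789ABCD" from by decide,
    show PySem.Str.join "" (compareList 7) = "789ABCDE" from by decide,
    show PySem.Str.join "" (compareList 8) = "89ABCDEF" from by decide,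
    show PySem.Str.join "" (compareList 9) = "9ABCDEF0" from by decide,
    show PySem.Str.join "" (compareList 10) = "ABCDEF01" from by decide,
    show PySem.Str.join "" (compareList 11) = "BCDEF012" from by decide,
    show PySem.Str.join "" (compareList 12) = "CDEF0123" from by decide,
    show PySem.Str.join "" (compareList 13) = "DEF01234" from by decide,
    show PySem.Str.join "" (compareList 14) = "EF012345" from by decide,
    show PySem.Str.join "" (compareList 15) = "F0123456" from by decide]
  simp only [ifStep]
  simp only [Bool.or_eq_true, beq_iff_eq, windows, List.mem_cons, List.not_mem_nil, or_false,
    Bool.false_eq_true]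

lemma mem_of_toList_mem {s : String} {ws : List String}
    (h : s.toList ∈ ws.map String.toList) : s ∈ ws := by
  obtain ⟨w, hw, he⟩ := List.mem_map.mp h
  exact String.toList_inj.mp he.symm ▸ hw

lemma B_iff (s : String) : is_consecutive_generation_alt s = true ↔ s ∈ windows := by
  constructor
  · intro h
    simp only [is_consecutive_generation_alt, Bool.and_eq_true, beq_iff_eq,
      PySem.Str.len_eq] at h
    obtain ⟨hlen, hin⟩ := h
    rw [PySem.Str.isIn_iff_infix] at hin
    have hL : (PySem.Str.join "" (hexChars ++ hexChars)).toList
        = "0123456789ABCDEF0123456789ABCDEF".toList := by decide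
    rw [hL] at hin
    have hpre := (PySem.Chars.exists_prefix_drop_iff_isIn ..).mpr
      ((PySem.Chars.isIn_iff_infix ..).mpr hin)
    obtain ⟨j, hj⟩ := hpre
    have hlen' : s.toList.length = 8 := by exact_mod_cast hlen
    have hje : s.toList = (("0123456789ABCDEF0123456789ABCDEF".toList).drop j).take 8 := by
      rw [← hlen']; exact List.prefix_iff_eq_take.mp hj
    have hjb : j ≤ 24 := by
      by_contra hgt
      have := congrArg List.length hje
      simp [hlen'] at this
      omega
    apply mem_of_toList_mem
    rw [hje]
    interval_cases j <;> decide
  · intro h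
    simp only [windows, List.mem_cons, List.not_mem_nil, or_false] at h
    rcases h with rfl|rfl|rfl|rfl|rfl|rfl|rfl|rfl|rfl|rfl|rfl|rfl|rfl|rfl|rfl|rfl <;> decide

-- ===== VERDICT (by name: the statement is the Claim_ definition above) =====
theorem is_consecutive_generation_spec : Claim_equal_is_consecutive_generation := by
  intro s _
  unfold Spec_is_consecutive_generation
  exact Bool.eq_iff_iff.mpr ((A_iff s).trans (B_iff s).symm)
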